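-- pv_equiv track=rewrite | github.com/Park-Minjoo/CODINGINTERVIEW_PRACTICE | 프로그래머스/2/340211. ［PCCP 기출문제］ 3번 ／ 충돌위험 찾기/［PCCP 기출문제］ 3번 ／ 충돌위험 찾기.py | solution
-- ===== SOURCE A (Python) =====
-- def solution(points, routes):
--     answer = 0
--     n = len(routes)
--     l = len(routes[0])
--     idx = [0 for _ in range(n)]
--     position = [[0,0] for _ in range(n)]
--     complete = [0 for _ in range(n)]
--
--     while 1:
--         pos_check = set()
--         conflict = set()
--         if sum(complete) == n:
--             break
--         for robot in range(n):
--             i = idx[robot]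
--             if i == 0:
--                 position[robot][0] = points[routes[robot][0]-1][0]
--                 position[robot][1] = points[routes[robot][0]-1][1]
--             elif i == l:
--                 complete[robot] = 1
--                 idx[robot] += 1
--                 continue
--             elif i > l:
--                 continue
--
--             destination = points[routes[robot][i]-1]
--             if position[robot][0] != destination[0]:
--                 move = 1 if position[robot][0] < destination[0] else -1
--                 position[robot][0] += move
--             elif position[robot][1] != destination[1]:
--                 move = 1 if position[robot][1] < destination[1] else -1
--                 position[robot][1] += move
--             if position[robot] == destination:
--                 idx[robot] += 1
--
--             x, y = position[robot]
--             if complete[robot]: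
--                 continue
--             if (x, y) in pos_check:
--                 conflict.add((x, y))
--             else:
--                 pos_check.add((x, y))
--         answer += len(conflict)
--     return answer
-- ===== SOURCE B (Python) =====
-- def solution(points, routes):
--     l = len(routes[0])
--     trajs = []
--     for route in routes:
--         p = points[route[0] - 1]
--         pos = (p[0], p[1])
--         traj = [pos]
--         for w in route[1:l]:
--             q = points[w - 1]
--             d = (q[0], q[1])
--             if pos == d:
--                 traj.append(pos)
--             else:
--                 x, y = pos
--                 while x != d[0]:
--                     x += 1 if x < d[0] else -1
--                     traj.append((x, y))
--                 while y != d[1]: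
--                     y += 1 if y < d[1] else -1
--                     traj.append((x, y))
--                 pos = d
--         trajs.append(traj)
--     answer = 0
--     for t in range(max(len(tr) for tr in trajs)):
--         cnt = {}
--         for tr in trajs:
--             if t < len(tr):
--                 q = tr[t]
--                 cnt[q] = cnt.get(q, 0) + 1
--         answer += sum(1 for c in cnt.values() if c >= 2)
--     return answer
-- ===== Notes on version B (the rewrite author's own statement) =====
-- stated objective: alternative
-- what changed: A interleaves all robots in one while-loop state machine (idx/position/complete arrays mutated per tick); B precomputes each robot's full trajectory as an explicit position list and then, for each time index, counts positions held by >=2 robots with a counter dict.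
import Mathlib
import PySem

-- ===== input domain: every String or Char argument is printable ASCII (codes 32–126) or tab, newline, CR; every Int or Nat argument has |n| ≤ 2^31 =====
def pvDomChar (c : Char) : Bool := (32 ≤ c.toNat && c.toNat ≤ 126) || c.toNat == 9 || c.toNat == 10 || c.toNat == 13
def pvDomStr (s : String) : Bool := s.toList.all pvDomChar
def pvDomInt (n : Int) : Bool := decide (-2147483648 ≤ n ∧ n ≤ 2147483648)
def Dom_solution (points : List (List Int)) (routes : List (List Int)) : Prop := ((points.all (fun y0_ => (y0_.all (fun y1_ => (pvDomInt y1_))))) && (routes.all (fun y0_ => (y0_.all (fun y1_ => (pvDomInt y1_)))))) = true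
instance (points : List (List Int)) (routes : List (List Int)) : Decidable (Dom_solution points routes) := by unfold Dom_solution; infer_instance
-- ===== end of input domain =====

-- B replaces A's interleaved while-loop state machine by a precompute-trajectories-then-
-- aggregate-per-time-index pass (objective: alternative decomposition, same cost).

-- ===== PORT A =====
-- A's per-robot state lists idx/position/complete are kept zipped as one list of
-- (idx, (x, y), complete) triples; each robot only reads/writes its own entry.
-- points[w-1] (Python negative-index wraparound) is PySem.List.pyGet?; Pre_ makes it hit.

def pvPointA (points : List (List Int)) (w : Int) : List Int :=
  (PySem.List.pyGet? points (w - 1)).getD []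

-- the shared tail of A's robot body (movement, arrival check, collision tally)
def pvBodyA (points : List (List Int)) (route : List Int) (i : Int) (pos : Int × Int)
    (c : Bool) (chk : PySem.Set (Int × Int) × PySem.Set (Int × Int)) :
    (Int × (Int × Int) × Bool) × PySem.Set (Int × Int) × PySem.Set (Int × Int) :=
  let dest := pvPointA points (PySem.List.pyGetD route i 0)
  let d0 := PySem.List.pyGetD dest 0 0
  let d1 := PySem.List.pyGetD dest 1 0
  let pos1 := if pos.1 ≠ d0 then (pos.1 + (if pos.1 < d0 then 1 else -1), pos.2)
    else if pos.2 ≠ d1 then (pos.1, pos.2 + (if pos.2 < d1 then 1 else -1))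
    else pos
  let i' := if [pos1.1, pos1.2] = dest then i + 1 else i
  if c then ((i', pos1, c), chk)
  else if chk.1.contains (pos1.1, pos1.2) then ((i', pos1, c), (chk.1, chk.2.add (pos1.1, pos1.2)))
  else ((i', pos1, c), (chk.1.add (pos1.1, pos1.2), chk.2))

def pvTickRobotA (points : List (List Int)) (l : Int) (route : List Int)
    (s : Int × (Int × Int) × Bool)
    (chk : PySem.Set (Int × Int) × PySem.Set (Int × Int)) :
    (Int × (Int × Int) × Bool) × PySem.Set (Int × Int) × PySem.Set (Int × Int) :=
  if s.1 = 0 then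
    let p := pvPointA points (PySem.List.pyGetD route 0 0)
    pvBodyA points route 0 (PySem.List.pyGetD p 0 0, PySem.List.pyGetD p 1 0) s.2.2 chk
  else if s.1 = l then ((s.1 + 1, s.2.1, true), chk)
  else if s.1 > l then (s, chk)
  else pvBodyA points route s.1 s.2.1 s.2.2 chk

def pvTickAllA (points : List (List Int)) (l : Int) (routes : List (List Int))
    (sts : List (Int × (Int × Int) × Bool)) :
    List (Int × (Int × Int) × Bool) × PySem.Set (Int × Int) × PySem.Set (Int × Int) :=
  (routes.zip sts).foldl
    (fun acc p =>
      let r := pvTickRobotA points l p.1 p.2 acc.2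
      (acc.1 ++ [r.1], r.2))
    ([], PySem.Set.empty, PySem.Set.empty)

def pvLoopA (points : List (List Int)) (l : Int) (routes : List (List Int)) :
    Nat → List (Int × (Int × Int) × Bool) → Int → Int
  | 0, _, answer => answer
  | fuel + 1, sts, answer =>
    if sts.all (fun s => s.2.2) then answer
    else
      let r := pvTickAllA points l routes sts
      pvLoopA points l routes fuel r.1 (answer + (r.2.2.length : Int))

-- totality guard only: an upper bound on the number of while-iterations A performs
def pvFuelA (points : List (List Int)) (l : Int) (route : List Int) : Nat :=
  let p := pvPointA points (PySem.List.pyGetD route 0 0)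
  ((PySem.List.slice route (some 1) (some l)).foldl
    (fun (acc : (Int × Int) × Nat) w =>
      let q := pvPointA points w
      let d : Int × Int := (PySem.List.pyGetD q 0 0, PySem.List.pyGetD q 1 0)
      (d, acc.2 + ((d.1 - acc.1.1).natAbs + (d.2 - acc.1.2).natAbs + 1)))
    ((PySem.List.pyGetD p 0 0, PySem.List.pyGetD p 1 0), 1)).2

def solution (points : List (List Int)) (routes : List (List Int)) : Int :=
  let l : Int := ((routes.headD []).length : Int)
  pvLoopA points l routes (2 + (routes.map (pvFuelA points l)).sum)
    (routes.map (fun _ => ((0 : Int), ((0 : Int), (0 : Int)), false))) 0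

-- ===== PORT B =====
def pvPointB (points : List (List Int)) (w : Int) : Int × Int :=
  let q := (PySem.List.pyGet? points (w - 1)).getD []
  (PySem.List.pyGetD q 0 0, PySem.List.pyGetD q 1 0)

-- the 'while x != d[0]' loop of Source B (one x-step per iteration)
def pvSegX (x tx y : Int) : List (Int × Int) :=
  if x = tx then [] else
    (x + (if x < tx then 1 else -1), y) :: pvSegX (x + (if x < tx then 1 else -1)) tx y
termination_by (tx - x).natAbs
decreasing_by split <;> omega

-- the 'while y != d[1]' loop of Source B
def pvSegY (x y ty : Int) : List (Int × Int) :=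
  if y = ty then [] else
    (x, y + (if y < ty then 1 else -1)) :: pvSegY x (y + (if y < ty then 1 else -1)) ty
termination_by (ty - y).natAbs
decreasing_by split <;> omega

def pvSeg (p d : Int × Int) : List (Int × Int) :=
  pvSegX p.1 d.1 p.2 ++ pvSegY d.1 p.2 d.2

def pvTrajB (points : List (List Int)) (l : Int) (route : List Int) : List (Int × Int) :=
  let start := pvPointB points (PySem.List.pyGetD route 0 0)
  ((PySem.List.slice route (some 1) (some l)).foldl
    (fun (acc : (Int × Int) × List (Int × Int)) w =>
      let d := pvPointB points w
      if acc.1 = d then (acc.1, acc.2 ++ [acc.1])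
      else (d, acc.2 ++ pvSeg acc.1 d))
    (start, [start])).2

def solution_alt (points : List (List Int)) (routes : List (List Int)) : Int :=
  let l : Int := ((routes.headD []).length : Int)
  let trajs := routes.map (pvTrajB points l)
  let M : Int := ((PySem.List.max? (trajs.map (fun tr => (tr.length : Int))) (fun v => v)).getD 0)
  (PySem.List.pyRange 0 M 1).foldl
    (fun answer t =>
      let cnt := trajs.foldl
        (fun (d : PySem.Dict (Int × Int) Int) tr =>
          if t < (tr.length : Int) then
            let q := PySem.List.pyGetD tr t (0, 0)
            d.insert q (d.getD q 0 + 1)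
          else d)
        PySem.Dict.empty
      answer + ((cnt.values.countP (fun c => 2 ≤ c)) : Int))
    0

-- ===== PRECONDITION & SPEC =====
-- Pre_ excludes exactly the inputs where A raises (empty routes, a route shorter than
-- routes[0], a waypoint index out of Python's index range, a referenced point row of
-- length < 2) or never returns (a referenced point row of length > 2 can never compare
-- equal to the length-2 position list, so that robot never completes and A loops forever).
def Pre_solution (points : List (List Int)) (routes : List (List Int)) : Prop :=
  routes ≠ [] ∧ 1 ≤ ((routes.headD []).length : Int) ∧
    ∀ r ∈ routes, ((routes.headD []).length : Int) ≤ (r.length : Int) ∧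
      ∀ w ∈ r.take (routes.headD []).length, ((PySem.List.pyGet? points (w - 1)).getD []).length = 2

instance (points : List (List Int)) (routes : List (List Int)) :
    Decidable (Pre_solution points routes) := by unfold Pre_solution; infer_instance

def pvWitness_solution : List (List Int) × List (List Int) :=
  ([[0, 0], [2, 1]], [[1, 2], [2, 1]])

def Spec_solution (points : List (List Int)) (routes : List (List Int)) (out : Int) : Prop := out = solution_alt points routes
instance (points : List (List Int)) (routes : List (List Int)) (out : Int) : Decidable (Spec_solution points routes out) := by unfold Spec_solution; infer_instance

-- ===== CLAIM (what is proved, stated in full; the proofs are below) =====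
def Claim_equal_solution : Prop := ∀ (points : List (List Int)) (routes : List (List Int)), Dom_solution points routes → Pre_solution points routes → Spec_solution points routes (solution points routes)

-- ===== LEMMAS AND PROOFS =====

theorem solution_witness_ok :
    Dom_solution pvWitness_solution.1 pvWitness_solution.2 ∧
      Pre_solution pvWitness_solution.1 pvWitness_solution.2 := by decide

-- ===== proof layer =====

-- one movement step of A's body: x first, then y
def pvStep (pos d : Int × Int) : Int × Int :=
  if pos.1 ≠ d.1 then (pos.1 + (if pos.1 < d.1 then 1 else -1), pos.2)
  else if pos.2 ≠ d.2 then (pos.1, pos.2 + (if pos.2 < d.2 then 1 else -1))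
  else pos

-- the per-route part of Pre_solution, as used by the robot-level lemmas
def pvGoodRoute (points : List (List Int)) (l : Int) (route : List Int) : Prop :=
  l ≤ (route.length : Int) ∧
    ∀ w ∈ route.take l.toNat, ((PySem.List.pyGet? points (w - 1)).getD []).length = 2

def pvTrajFrom : List (Int × Int) → (Int × Int) → List (Int × Int)
  | [], _ => []
  | d :: ds, p => if p = d then p :: pvTrajFrom ds p else pvSeg p d ++ pvTrajFrom ds d

def pvDests (points : List (List Int)) (l : Int) (route : List Int) : List (Int × Int) :=
  (PySem.List.slice route (some 1) (some l)).map (pvPointB points)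

def pvStart (points : List (List Int)) (route : List Int) : Int × Int :=
  pvPointB points (PySem.List.pyGetD route 0 0)

def pvTraj (points : List (List Int)) (l : Int) (route : List Int) : List (Int × Int) :=
  pvStart points route :: pvTrajFrom (pvDests points l route) (pvStart points route)

def pvMark (chk : PySem.Set (Int × Int) × PySem.Set (Int × Int)) (p : Int × Int) :
    PySem.Set (Int × Int) × PySem.Set (Int × Int) :=
  if chk.1.contains p then (chk.1, chk.2.add p) else (chk.1.add p, chk.2)

def pvDup (ps : List (Int × Int)) : Nat :=
  (PySem.Set.ofList ps).countP (fun p => 2 ≤ ps.count p)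

def pvSim (points : List (List Int)) (l : Int) (route : List Int)
    (s : Int × (Int × Int) × Bool) (rest : List (Int × Int)) : Prop :=
  (s = (0, (0, 0), false) ∧ rest = pvTraj points l route)
  ∨ (∃ j : Nat, (j : Int) ≤ l - 1 ∧ s.1 = 1 + (j : Int) ∧ s.2.2 = false ∧
      pvTrajFrom ((pvDests points l route).drop j) s.2.1 = rest)
  ∨ (s.1 = l + 1 ∧ s.2.2 = true ∧ rest = [])

def pvSims (points : List (List Int)) (l : Int) :
    List (List Int) → List (Int × (Int × Int) × Bool) → List (List (Int × Int)) → Prop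
  | [], [], [] => True
  | r :: rs, s :: ss, t :: ts => pvSim points l r s t ∧ pvSims points l rs ss ts
  | _, _, _ => False

lemma pvGold_dec {rests : List (List (Int × Int))} (h : ¬ rests.all List.isEmpty = true) :
    (rests.map (fun r => r.tail.length)).sum < (rests.map List.length).sum := by
  induction rests with
  | nil => simp at h
  | cons a t ih =>
    simp only [List.all_cons, Bool.and_eq_true] at h
    by_cases ha : a.isEmpty = true
    · have := ih (by tauto)
      cases a <;> simp_all
    · have h1 : a.tail.length < a.length := by cases a <;> simp_all
      have h2 : (t.map (fun r => r.tail.length)).sum ≤ (t.map List.length).sum := by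
        apply List.sum_le_sum; intro x hx; simp [List.length_tail]
      simp only [List.map_cons, List.sum_cons]; omega

def pvGold (rests : List (List (Int × Int))) : Int :=
  if _h : rests.all List.isEmpty then 0
  else (pvDup (rests.filterMap List.head?) : Int) + pvGold (rests.map List.tail)
termination_by (rests.map List.length).sum
decreasing_by simp only [List.map_map]; simpa using pvGold_dec _h

-- segment lengths
lemma pvSegX_length' : ∀ (n : Nat) (x tx y : Int), (tx - x).natAbs = n →
    (pvSegX x tx y).length = n := by
  intro n
  induction n with
  | zero => intro x tx y h; rw [pvSegX]; simp [show x = tx by omega]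
  | succ n ih =>
    intro x tx y h
    rw [pvSegX]
    have hne : x ≠ tx := by omega
    by_cases hx : x < tx <;> simp [hne, hx] <;> [exact ih _ _ _ (by omega); exact ih _ _ _ (by omega)]

lemma pvSegX_length (x tx y : Int) : (pvSegX x tx y).length = (tx - x).natAbs :=
  pvSegX_length' _ x tx y rfl

lemma pvSegY_length' : ∀ (n : Nat) (x y ty : Int), (ty - y).natAbs = n →
    (pvSegY x y ty).length = n := by
  intro n
  induction n with
  | zero => intro x y ty h; rw [pvSegY]; simp [show y = ty by omega]
  | succ n ih =>
    intro x y ty h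
    rw [pvSegY]
    have hne : y ≠ ty := by omega
    by_cases hy : y < ty <;> simp [hne, hy] <;> [exact ih _ _ _ (by omega); exact ih _ _ _ (by omega)]

lemma pvSegY_length (x y ty : Int) : (pvSegY x y ty).length = (ty - y).natAbs :=
  pvSegY_length' _ x y ty rfl

lemma pvSeg_length (p d : Int × Int) :
    (pvSeg p d).length = (d.1 - p.1).natAbs + (d.2 - p.2).natAbs := by
  simp [pvSeg, pvSegX_length, pvSegY_length]

lemma pvSeg_self (d : Int × Int) : pvSeg d d = [] := by
  rw [pvSeg, pvSegX, pvSegY]; simp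

lemma pvSeg_cons {p d : Int × Int} (h : p ≠ d) :
    pvSeg p d = pvStep p d :: pvSeg (pvStep p d) d := by
  obtain ⟨x, y⟩ := p; obtain ⟨a, b⟩ := d
  by_cases hx : x = a
  · subst hx
    have hy : y ≠ b := by simpa [Prod.ext_iff] using h
    simp only [pvSeg, pvStep]
    rw [pvSegX, pvSegY]
    simp only [ne_eq, not_true_eq_false, ite_false, hy, ite_true]
    rw [pvSegX]
    simp
  · simp only [pvSeg, pvStep]
    rw [pvSegX]
    simp [hx]

lemma pvSeg_ne_nil {p d : Int × Int} (h : p ≠ d) : pvSeg p d ≠ [] := by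
  intro hc
  have := pvSeg_length p d
  rw [hc] at this
  simp at this
  exact h (by obtain ⟨x,y⟩ := p; obtain ⟨a,b⟩ := d; simp_all [Prod.ext_iff]; omega)

lemma pvTrajFrom_eq_nil_iff (ds : List (Int × Int)) (p : Int × Int) :
    pvTrajFrom ds p = [] ↔ ds = [] := by
  cases ds with
  | nil => simp [pvTrajFrom]
  | cons d ds =>
    simp only [pvTrajFrom]
    split_ifs with hpd
    · simp
    · simp [pvSeg_ne_nil hpd]

-- B's trajectory fold computes pvTraj
lemma pvTrajB_fold (points : List (List Int)) :
    ∀ (ws : List Int) (p : Int × Int) (acc : List (Int × Int)),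
      (ws.foldl (fun (acc : (Int × Int) × List (Int × Int)) w =>
          let d := pvPointB points w
          if acc.1 = d then (acc.1, acc.2 ++ [acc.1]) else (d, acc.2 ++ pvSeg acc.1 d))
        (p, acc)).2 = acc ++ pvTrajFrom (ws.map (pvPointB points)) p := by
  intro ws
  induction ws with
  | nil => intro p acc; simp [pvTrajFrom]
  | cons w ws ih =>
    intro p acc
    simp only [List.foldl_cons, List.map_cons, pvTrajFrom]
    split_ifs with hpd
    · rw [ih]; simp
    · rw [ih]; simp

lemma pvTrajB_eq (points : List (List Int)) (l : Int) (route : List Int) :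
    pvTrajB points l route = pvTraj points l route := by
  rw [pvTrajB, pvTraj, pvStart, pvDests]
  rw [pvTrajB_fold]
  simp

-- characterization of A's shared body on a well-formed destination
lemma pvPoint_pair {points : List (List Int)} {w : Int}
    (h : ((PySem.List.pyGet? points (w - 1)).getD []).length = 2) :
    pvPointA points w = [(pvPointB points w).1, (pvPointB points w).2] := by
  rw [pvPointA, pvPointB]
  match hq : (PySem.List.pyGet? points (w - 1)).getD [], h with
  | [a, b], _ => simp [pysem]

lemma pvBodyA_eq {points : List (List Int)} {route : List Int} {i : Int} (a b : Int)
    (pos : Int × Int) (chk : PySem.Set (Int × Int) × PySem.Set (Int × Int))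
    (hdest : pvPointA points (PySem.List.pyGetD route i 0) = [a, b]) :
    pvBodyA points route i pos false chk =
      ((if pvStep pos (a, b) = (a, b) then i + 1 else i, pvStep pos (a, b), false),
        pvMark chk (pvStep pos (a, b))) := by
  have h0 : PySem.List.pyGetD [a, b] (0 : Int) 0 = a := by simp [pysem]
  have h1 : PySem.List.pyGetD [a, b] (1 : Int) 0 = b := by simp [pysem]
  have hstep : (if pos.1 ≠ a then (pos.1 + (if pos.1 < a then 1 else -1), pos.2)
      else if pos.2 ≠ b then (pos.1, pos.2 + (if pos.2 < b then 1 else -1)) else pos)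
      = pvStep pos (a, b) := rfl
  have hlist : (([(pvStep pos (a, b)).1, (pvStep pos (a, b)).2] : List Int) = [a, b])
      ↔ pvStep pos (a, b) = (a, b) := by
    constructor
    · intro h; simp at h; exact Prod.ext_iff.2 ⟨h.1, h.2⟩
    · intro h; rw [h]
  simp only [pvBodyA, hdest, h0, h1, hstep, pvMark]
  by_cases he : pvStep pos (a, b) = (a, b) <;>
    by_cases hc : chk.1.contains (pvStep pos (a, b)) <;>
      simp only [he, hc, hlist, Bool.false_eq_true, if_false, if_true] <;>
        split <;> rfl

-- single-robot tick lemmas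
lemma pvSim_complete {points l route s rest} (hs : pvSim points l route s rest)
    (hc : s.2.2 = true) : rest = [] := by
  rcases hs with ⟨h1, _⟩ | ⟨j, _, _, hfalse, _⟩ | ⟨_, _, h3⟩
  · rw [h1] at hc; simp at hc
  · rw [hfalse] at hc; simp at hc
  · exact h3

lemma pvDests_length {points : List (List Int)} {l : Int} {route : List Int}
    (hl : 1 ≤ l) (hle : l ≤ (route.length : Int)) :
    (pvDests points l route).length = l.toNat - 1 := by
  rw [pvDests, PySem.List.slice_toNat route (by omega) (by omega)]
  simp; omega

lemma pvDests_drop {points : List (List Int)} {l : Int} {route : List Int}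
    (hl : 1 ≤ l) (hle : l ≤ (route.length : Int)) {j : Nat} (hj : j < l.toNat - 1) :
    ∃ w, w ∈ route.take l.toNat ∧
      (pvDests points l route).drop j =
        pvPointB points w :: (pvDests points l route).drop (j + 1) ∧
      PySem.List.pyGetD route (1 + (j : Int)) 0 = w := by
  have hw : 1 + j < route.length := by omega
  have hsl : (PySem.List.slice route (some 1) (some l))[j]? = some route[1 + j] := by
    rw [PySem.List.slice_toNat route (by omega) (by omega)]
    rw [List.getElem?_take_of_lt (by omega), List.getElem?_drop]
    simp [hw]
  refine ⟨route[1 + j], ?_, ?_, ?_⟩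
  · have htk : (route.take l.toNat)[1 + j]? = some route[1 + j] := by
      rw [List.getElem?_take_of_lt (by omega)]
      simp [hw]
    exact List.mem_of_getElem? htk
  · have hjlen : j < (pvDests points l route).length := by
      rw [pvDests_length hl hle]; omega
    rw [List.drop_eq_getElem_cons hjlen]
    congr 1
    have : (pvDests points l route)[j]? = some (pvPointB points route[1 + j]) := by
      rw [pvDests, List.getElem?_map, hsl]
      rfl
    have h2 := List.getElem?_eq_getElem hjlen
    rw [this] at h2
    exact (Option.some.inj h2).symm
  · have : (1 + (j : Int)) = ((1 + j : Nat) : Int) := by push_cast; ring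
    rw [this, PySem.List.pyGetD_natCast]
    simp [hw]

lemma pvTick_sim_nil {points l route s chk} (hl : 1 ≤ l)
    (hg : pvGoodRoute points l route) (hs : pvSim points l route s []) :
    ∃ s', pvTickRobotA points l route s chk = (s', chk) ∧
      pvSim points l route s' [] ∧ s'.2.2 = true := by
  obtain ⟨hle, hpts⟩ := hg
  rcases hs with ⟨h1, h2⟩ | ⟨j, hj, hi, hcf, htf⟩ | ⟨hi, hc, -⟩
  · exact absurd h2.symm (by simp [pvTraj])
  · -- the remaining-destinations list is empty, so i = l: A marks the robot complete
    have hds : (pvDests points l route).drop j = [] := by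
      by_contra hne
      exact hne (by simpa [pvTrajFrom_eq_nil_iff] using htf.symm) 
    have hdl : (pvDests points l route).length = l.toNat - 1 := pvDests_length hl hle
    have hjl : (j : Int) = l - 1 := by
      have := List.drop_eq_nil_iff.1 hds
      omega
    have hil : s.1 = l := by omega
    rw [pvTickRobotA]
    simp only [hil, if_neg (by omega : ¬ (l = 0)), if_true]
    exact ⟨(l + 1, s.2.1, true), rfl, Or.inr (Or.inr ⟨rfl, rfl, rfl⟩), rfl⟩
  · rw [pvTickRobotA]
    simp only [hi]
    rw [if_neg (by omega : ¬ (l + 1 = (0:Int))), if_neg (by omega : ¬ (l + 1 = l)),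
      if_pos (by omega : l + 1 > l)]
    exact ⟨s, rfl, Or.inr (Or.inr ⟨hi, hc, rfl⟩), hc⟩

lemma pvTick_sim_cons {points l route s chk p rest'} (hl : 1 ≤ l)
    (hg : pvGoodRoute points l route) (hs : pvSim points l route s (p :: rest')) :
    ∃ s', pvTickRobotA points l route s chk = (s', pvMark chk p) ∧
      pvSim points l route s' rest' ∧ s'.2.2 = false := by
  obtain ⟨hle, hpts⟩ := hg
  obtain ⟨si, spos, sc⟩ := s
  rcases hs with ⟨h1, h2⟩ | ⟨j, hj, hi, hcf, htf⟩ | ⟨hi, hc, h3⟩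
  · -- first tick: A initialises the position from waypoint 0 and tallies it
    obtain ⟨hsi, hsp, hsc⟩ : si = 0 ∧ spos = (0, 0) ∧ sc = false := by
      simpa [Prod.ext_iff] using h1
    subst hsi hsp hsc
    have hroute0 : PySem.List.pyGetD route (0 : Int) 0 = route.headD 0 := by
      rcases route with _ | ⟨w, ws⟩
      · simp at hle; omega
      · rw [show (0 : Int) = ((0 : Nat) : Int) from rfl, PySem.List.pyGetD_natCast]; simp
    have hmem : route.headD 0 ∈ route.take l.toNat := by
      rcases route with _ | ⟨w, ws⟩
      · simp at hle; omega
      · obtain ⟨n, hn⟩ : ∃ n, l.toNat = n + 1 := ⟨l.toNat - 1, by omega⟩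
        rw [hn]; simp
    have hdest : pvPointA points (PySem.List.pyGetD route (0 : Int) 0) =
        [(pvStart points route).1, (pvStart points route).2] := by
      rw [hroute0, pvStart, hroute0]
      exact pvPoint_pair (hpts _ hmem)
    have hstartpair : ((PySem.List.pyGetD (pvPointA points (PySem.List.pyGetD route 0 0)) 0 0 : Int),
        (PySem.List.pyGetD (pvPointA points (PySem.List.pyGetD route 0 0)) 1 0 : Int)) =
        pvStart points route := by
      rw [hdest]
      have ha : PySem.List.pyGetD [(pvStart points route).1, (pvStart points route).2] (0:Int) 0
          = (pvStart points route).1 := by simp [pysem]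
      have hb : PySem.List.pyGetD [(pvStart points route).1, (pvStart points route).2] (1:Int) 0
          = (pvStart points route).2 := by simp [pysem]
      rw [ha, hb]
    have hstep : pvStep (pvStart points route)
        ((pvStart points route).1, (pvStart points route).2) = pvStart points route := by
      rw [pvStep]; simp
    obtain ⟨hp, hr⟩ : p = pvStart points route ∧
        rest' = pvTrajFrom (pvDests points l route) (pvStart points route) := by
      rw [pvTraj] at h2
      exact ⟨(List.cons_eq_cons.mp h2).1, (List.cons_eq_cons.mp h2).2⟩
    rw [pvTickRobotA]
    simp only
    rw [if_pos trivial, hstartpair]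
    rw [pvBodyA_eq (pvStart points route).1 (pvStart points route).2 _ _ hdest]
    rw [hstep, if_pos rfl, hp]
    refine ⟨_, rfl, ?_, rfl⟩
    exact Or.inr (Or.inl ⟨0, by omega, by simp, rfl, by simp [hr]⟩)
  · -- middle of the route: one movement (or stall) step toward destination j
    simp only at hi hcf htf
    subst hcf
    have hdnil : (pvDests points l route).drop j ≠ [] := by
      intro hds; rw [hds] at htf; simp [pvTrajFrom] at htf
    have hdl : (pvDests points l route).length = l.toNat - 1 := pvDests_length hl hle
    have hjlt : j < l.toNat - 1 := by
      have := List.drop_eq_nil_iff.not.1 hdnil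
      omega
    obtain ⟨w, hwmem, hdropeq, hgetd⟩ := pvDests_drop hl hle hjlt
    set d := pvPointB points w with hd
    have hdest : pvPointA points (PySem.List.pyGetD route si 0) = [d.1, d.2] := by
      rw [hi, hgetd]
      exact pvPoint_pair (hpts _ hwmem)
    rw [pvTickRobotA]
    simp only
    rw [if_neg (by omega : ¬ (si = 0)), if_neg (by omega : ¬ (si = l)),
      if_neg (by omega : ¬ (si > l))]
    rw [pvBodyA_eq d.1 d.2 _ _ hdest]
    rw [hdropeq, pvTrajFrom] at htf
    have hdd : ((d.1, d.2) : Int × Int) = d := rfl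
    by_cases hpd : spos = d
    · -- stall step on a duplicated waypoint
      rw [if_pos hpd] at htf
      obtain ⟨hp, hr⟩ := List.cons_eq_cons.mp htf
      have hstep : pvStep spos (d.1, d.2) = (d.1, d.2) := by
        rw [pvStep, hpd]; simp
      rw [hstep, if_pos rfl, hdd, ← hpd, hp]
      refine ⟨_, rfl, ?_, rfl⟩
      refine Or.inr (Or.inl ⟨j + 1, by push_cast; omega, by rw [hi]; push_cast; ring, rfl, ?_⟩)
      simp only
      rw [← hp]
      exact hr
    · rw [if_neg hpd] at htf
      rw [pvSeg_cons hpd] at htf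
      obtain ⟨hp, hr⟩ := List.cons_eq_cons.mp htf
      rw [hdd]
      by_cases harr : pvStep spos d = d
      · rw [if_pos harr, hp]
        refine ⟨_, rfl, ?_, rfl⟩
        refine Or.inr (Or.inl ⟨j + 1, by push_cast; omega, by rw [hi]; push_cast; ring, rfl, ?_⟩)
        simp only
        rw [← hp, harr, ← hr, harr, pvSeg_self]
        rfl
      · rw [if_neg harr, hp]
        refine ⟨_, rfl, ?_, rfl⟩
        refine Or.inr (Or.inl ⟨j, hj, hi, rfl, ?_⟩)
        simp only
        rw [← hp, hdropeq, pvTrajFrom, if_neg harr, ← hr]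
        rfl
  · exact absurd h3 (by simp)

-- the conflict set built by folding pvMark counts duplicated positions
lemma pvMark_fold (ps : List (Int × Int)) : ∀ (pre confl : List (Int × Int)), confl.Nodup →
    (∀ x, x ∈ confl ↔ x ∈ pre ∧ 2 ≤ pre.count x) →
    (ps.foldl pvMark (PySem.Set.ofList pre, confl)).1 = PySem.Set.ofList (pre ++ ps) ∧
      (ps.foldl pvMark (PySem.Set.ofList pre, confl)).2.Nodup ∧
      (∀ x, x ∈ (ps.foldl pvMark (PySem.Set.ofList pre, confl)).2 ↔
        x ∈ pre ++ ps ∧ 2 ≤ (pre ++ ps).count x) := by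
  induction ps with
  | nil =>
    intro pre confl hn hmem
    rw [List.append_nil]
    exact ⟨rfl, hn, hmem⟩
  | cons q qs ih =>
    intro pre confl hn hmem
    rw [List.append_cons]
    simp only [List.foldl_cons]
    by_cases hq : q ∈ pre
    · have hc : (PySem.Set.ofList pre).contains q = true :=
        (PySem.Set.contains_iff _ _).2 ((PySem.Set.mem_ofList _ _).2 hq)
      have hm : pvMark (PySem.Set.ofList pre, confl) q =
          (PySem.Set.ofList (pre ++ [q]), PySem.Set.add confl q) := by
        rw [pvMark, if_pos hc, PySem.Set.ofList_append_singleton,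
          PySem.Set.add_of_mem ((PySem.Set.mem_ofList _ _).2 hq)]
      rw [hm]
      apply ih
      · exact PySem.Set.nodup_add _ _ hn
      · intro x
        rw [PySem.Set.mem_add]
        constructor
        · rintro (hx | rfl)
          · obtain ⟨h1, h2⟩ := (hmem x).1 hx
            exact ⟨List.mem_append_left _ h1, by rw [List.count_append]; omega⟩
          · refine ⟨List.mem_append_right _ (by simp), ?_⟩
            rw [List.count_append]
            have := List.one_le_count_iff.2 hq
            simp; omega
        · rintro ⟨h1, h2⟩
          by_cases hxq : x = q
          · right; exact hxq
          · left
            apply (hmem x).2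
            rw [List.count_append] at h2
            rcases List.mem_append.1 h1 with h | h
            · refine ⟨h, ?_⟩
              have : x ∉ [q] := by simp [hxq]
              rw [List.count_eq_zero.2 this] at h2
              omega
            · simp at h; exact absurd h hxq
    · have hc : (PySem.Set.ofList pre).contains q = false := by
        rw [← Bool.not_eq_true]
        rw [PySem.Set.contains_iff, PySem.Set.mem_ofList]
        exact hq
      have hm : pvMark (PySem.Set.ofList pre, confl) q =
          (PySem.Set.ofList (pre ++ [q]), confl) := by
        rw [pvMark, if_neg (by rw [hc]; simp), PySem.Set.ofList_append_singleton]
      rw [hm]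
      apply ih
      · exact hn
      · intro x
        rw [hmem x]
        constructor
        · rintro ⟨h1, h2⟩
          exact ⟨List.mem_append_left _ h1, by rw [List.count_append]; omega⟩
        · rintro ⟨h1, h2⟩
          rw [List.count_append] at h2
          by_cases hxq : x = q
          · subst hxq
            rw [List.count_eq_zero.2 hq] at h2
            simp at h2
          · have : x ∉ [q] := by simp [hxq]
            rw [List.count_eq_zero.2 this] at h2
            rcases List.mem_append.1 h1 with h | h
            · exact ⟨h, by omega⟩
            · simp at h; exact absurd h hxq

lemma pvMark_fold_length (ps : List (Int × Int)) :
    ((ps.foldl pvMark (PySem.Set.empty, PySem.Set.empty)).2.length) = pvDup ps := by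
  obtain ⟨-, hn, hmem⟩ := pvMark_fold ps [] [] (by simp) (by simp)
  rw [pvDup, List.countP_eq_length_filter]
  apply List.Perm.length_eq
  apply (List.perm_ext_iff_of_nodup hn (List.Nodup.filter _ (PySem.Set.nodup_ofList _))).2
  intro a
  rw [List.mem_filter, PySem.Set.mem_ofList]
  have h := hmem a
  simp only [List.nil_append] at h
  show a ∈ (List.foldl pvMark (PySem.Set.ofList [], ([] : PySem.Set (Int × Int))) ps).2 ↔ _
  rw [h]
  simp

-- one global iteration of A's while loop
lemma pvTickAll_sim {points : List (List Int)} {l : Int} (hl : 1 ≤ l) :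
    ∀ (rts : List (List Int)) (sts : List (Int × (Int × Int) × Bool))
      (rests : List (List (Int × Int))) (acc : List (Int × (Int × Int) × Bool))
      (chk : PySem.Set (Int × Int) × PySem.Set (Int × Int)),
      (∀ r ∈ rts, pvGoodRoute points l r) → pvSims points l rts sts rests →
      ∃ sts', (rts.zip sts).foldl
          (fun acc p =>
            let r := pvTickRobotA points l p.1 p.2 acc.2
            (acc.1 ++ [r.1], r.2)) (acc, chk) =
          (acc ++ sts', (rests.filterMap List.head?).foldl pvMark chk) ∧
        pvSims points l rts sts' (rests.map List.tail) ∧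
        (sts'.all (fun s => s.2.2) = rests.all List.isEmpty) := by
  intro rts
  induction rts with
  | nil =>
    intro sts rests acc chk hg hs
    cases sts <;> cases rests <;>
      [ exact ⟨[], by simp, by simp [pvSims], rfl⟩;
        exact absurd hs (by simp [pvSims]);
        exact absurd hs (by simp [pvSims]);
        exact absurd hs (by simp [pvSims])]
  | cons r rs ih =>
    intro sts rests acc chk hg hs
    cases sts with
    | nil => cases rests <;> exact absurd hs (by simp [pvSims])
    | cons s ss =>
      cases rests with
      | nil => exact absurd hs (by simp [pvSims])
      | cons t ts =>
        obtain ⟨h1, h2⟩ := hs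
        have hgr : pvGoodRoute points l r := hg r (by simp)
        have hgs : ∀ r' ∈ rs, pvGoodRoute points l r' := fun r' hr' => hg r' (by simp [hr'])
        simp only [List.zip_cons_cons, List.foldl_cons]
        cases t with
        | nil =>
          obtain ⟨s', hts, hsim', hc'⟩ := pvTick_sim_nil (chk := chk) hl hgr h1
          rw [hts]
          obtain ⟨sts'', heq, hsims'', hall''⟩ := ih ss ts (acc ++ [s']) chk hgs h2
          refine ⟨s' :: sts'', ?_, ⟨hsim', hsims''⟩, ?_⟩
          · rw [heq]
            simp
          · simp [hc', hall'']
        | cons p t' =>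
          obtain ⟨s', hts, hsim', hc'⟩ := pvTick_sim_cons (chk := chk) hl hgr h1
          rw [hts]
          obtain ⟨sts'', heq, hsims'', hall''⟩ := ih ss ts (acc ++ [s']) (pvMark chk p) hgs h2
          refine ⟨s' :: sts'', ?_, ⟨hsim', hsims''⟩, ?_⟩
          · rw [heq]
            simp
          · simp [hc']

lemma pvSims_complete {points l} : ∀ {rts sts rests}, pvSims points l rts sts rests →
    sts.all (fun s => s.2.2) = true → rests.all List.isEmpty = true := by
  intro rts
  induction rts with
  | nil =>
    intro sts rests hs _
    cases sts <;> cases rests <;> simp_all [pvSims]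
  | cons r rs ih =>
    intro sts rests hs ha
    cases sts with
    | nil => cases rests <;> simp_all [pvSims]
    | cons s ss =>
      cases rests with
      | nil => simp_all [pvSims]
      | cons t ts =>
        obtain ⟨h1, h2⟩ := hs
        simp only [List.all_cons, Bool.and_eq_true] at ha ⊢
        have ht : t = [] := pvSim_complete h1 ha.1
        exact ⟨by simp [ht], ih h2 ha.2⟩

-- A's while loop computes pvGold
lemma pvLoopA_eq {points : List (List Int)} {l : Int} {routes : List (List Int)}
    (hl : 1 ≤ l) (hg : ∀ r ∈ routes, pvGoodRoute points l r) :
    ∀ (fuel : Nat) (sts : List (Int × (Int × Int) × Bool))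
      (rests : List (List (Int × Int))) (ans : Int),
      pvSims points l routes sts rests →
      (rests.map List.length).sum + (if sts.all (fun s => s.2.2) then 1 else 2) ≤ fuel →
      pvLoopA points l routes fuel sts ans = ans + pvGold rests := by
  intro fuel
  induction fuel with
  | zero =>
    intro sts rests ans _ hb
    split_ifs at hb <;> omega
  | succ fuel ih =>
    intro sts rests ans hsims hb
    rw [pvLoopA]
    by_cases hall : sts.all (fun s => s.2.2)
    · rw [if_pos hall]
      have hre := pvSims_complete hsims hall
      rw [pvGold, dif_pos hre]
      ring
    · rw [if_neg hall]
      rw [if_neg hall] at hb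
      obtain ⟨sts', heq, hsims', hall'⟩ :=
        pvTickAll_sim hl routes sts rests [] (PySem.Set.empty, PySem.Set.empty) hg hsims
      have heq' : pvTickAllA points l routes sts =
          (sts', (rests.filterMap List.head?).foldl pvMark (PySem.Set.empty, PySem.Set.empty)) := by
        rw [pvTickAllA, heq]
        simp
      rw [heq']
      simp only
      rw [pvMark_fold_length]
      by_cases hre : rests.all List.isEmpty
      · have hsum0 : (rests.map List.length).sum = 0 := by
          rw [List.all_eq_true] at hre
          rw [List.sum_eq_zero_iff]
          intro n hn
          obtain ⟨r, hr, hrn⟩ := List.mem_map.1 hn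
          rw [List.isEmpty_iff.1 (hre r hr)] at hrn
          simp at hrn
          omega
        have htails : rests.map List.tail = rests := by
          rw [List.all_eq_true] at hre
          apply List.map_congr_left ?_ |>.trans (List.map_id _)
          intro r hr
          rw [List.isEmpty_iff.1 (hre r hr)]
          rfl
        have hheads : rests.filterMap List.head? = [] := by
          rw [List.filterMap_eq_nil_iff]
          intro r hr
          rw [List.all_eq_true] at hre
          rw [List.isEmpty_iff.1 (hre r hr)]
          rfl
        have hbnd : ((rests.map List.tail).map List.length).sum +
            (if sts'.all (fun s => s.2.2) then 1 else 2) ≤ fuel := by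
          rw [htails, hsum0, hall', hre, if_pos rfl]
          rw [hsum0] at hb
          omega
        rw [ih sts' (rests.map List.tail) _ hsims' hbnd]
        have hgold : pvGold rests = 0 := by rw [pvGold, dif_pos hre]
        rw [hheads, htails, hgold]
        simp [pvDup]
      · have hdec := pvGold_dec hre
        have hmt : (rests.map List.tail).map List.length =
            rests.map (fun r => r.tail.length) := by
          rw [List.map_map]
          rfl
        have hbnd : ((rests.map List.tail).map List.length).sum +
            (if sts'.all (fun s => s.2.2) then 1 else 2) ≤ fuel := by
          rw [hmt]
          split_ifs <;> omega
        rw [ih sts' (rests.map List.tail) _ hsims' hbnd]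
        have hgold : pvGold rests = (pvDup (rests.filterMap List.head?) : Int) +
            pvGold (rests.map List.tail) := by
          rw [pvGold]
          rw [dif_neg hre]
        rw [hgold]
        ring

-- pvGold as a sum over time indices
lemma pvGold_eq_sum : ∀ (M : Nat) (rests : List (List (Int × Int))),
    (∀ r ∈ rests, r.length ≤ M) →
    pvGold rests =
      ((List.range M).map (fun t => (pvDup (rests.filterMap (fun r => r[t]?)) : Int))).sum := by
  intro M
  induction M with
  | zero =>
    intro rests hlen
    have hre : rests.all List.isEmpty := by
      rw [List.all_eq_true]
      intro r hr
      rw [List.isEmpty_iff, ← List.length_eq_zero_iff]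
      have := hlen r hr
      omega
    rw [pvGold, dif_pos hre]
    simp
  | succ M ih =>
    intro rests hlen
    by_cases hre : rests.all List.isEmpty
    · have hfm : ∀ t : Nat, rests.filterMap (fun r => r[t]?) = [] := by
        intro t
        rw [List.filterMap_eq_nil_iff]
        intro r hr
        rw [List.all_eq_true] at hre
        rw [List.isEmpty_iff.1 (hre r hr)]
        simp
      rw [pvGold, dif_pos hre]
      simp only [hfm]
      simp [pvDup]
    · rw [pvGold, dif_neg hre]
      rw [List.range_succ_eq_map]
      simp only [List.map_cons, List.sum_cons]
      congr 1
      · congr 2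
        apply List.filterMap_congr
        intro r _
        rw [List.head?_eq_getElem?]
      · rw [ih (rests.map List.tail) ?_]
        · rw [List.map_map]
          apply congrArg List.sum
          apply List.map_congr_left
          intro t _
          simp only [Function.comp_apply]
          congr 1
          rw [List.filterMap_map]
          apply congrArg pvDup
          apply List.filterMap_congr
          intro r _
          simp only [Function.comp_apply, Nat.succ_eq_add_one]
          rw [List.getElem?_tail]
        · intro r hr
          obtain ⟨r0, hr0, hrt⟩ := List.mem_map.1 hr
          have := hlen r0 hr0
          subst hrt
          rw [List.length_tail]
          omega

-- B's per-time counter counts duplicated positions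
lemma pvCnt_eq (trajs : List (List (Int × Int))) (t : Nat) :
    ((trajs.foldl
        (fun (d : PySem.Dict (Int × Int) Int) tr =>
          if (t : Int) < (tr.length : Int) then
            d.insert (PySem.List.pyGetD tr (t : Int) ((0 : Int), (0 : Int)))
              (d.getD (PySem.List.pyGetD tr (t : Int) ((0 : Int), (0 : Int))) 0 + 1)
          else d)
        PySem.Dict.empty).values.countP (fun c => 2 ≤ c)) =
      pvDup (trajs.filterMap (fun r => r[t]?)) := by
  have hlist : (trajs.filter (fun tr => decide ((t : Int) < (tr.length : Int)))).map
      (fun tr => PySem.List.pyGetD tr (t : Int) ((0 : Int), (0 : Int))) =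
      trajs.filterMap (fun r => r[t]?) := by
    induction trajs with
    | nil => simp
    | cons tr trs ih =>
      by_cases h : t < tr.length
      · have hd : ((t : Int) < (tr.length : Int)) := by exact_mod_cast h
        have hsome : tr[t]? = some tr[t] := List.getElem?_eq_getElem h
        simp only [List.filter_cons, List.filterMap_cons, hd, decide_true, if_true, hsome,
          List.map_cons, ih]
        rw [PySem.List.pyGetD_natCast, List.getD_eq_getElem _ _ h]
      · have hd : ¬ ((t : Int) < (tr.length : Int)) := by exact_mod_cast h
        have hnone : tr[t]? = none := List.getElem?_eq_none (by omega)
        simp only [List.filter_cons, List.filterMap_cons, hd, decide_false, Bool.false_eq_true, if_false, hnone, ih]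
  set ps := trajs.filterMap (fun r => r[t]?) with hps
  have hfold : trajs.foldl
      (fun (d : PySem.Dict (Int × Int) Int) tr =>
        if (t : Int) < (tr.length : Int) then
          d.insert (PySem.List.pyGetD tr (t : Int) ((0 : Int), (0 : Int)))
            (d.getD (PySem.List.pyGetD tr (t : Int) ((0 : Int), (0 : Int))) 0 + 1)
        else d)
      PySem.Dict.empty = PySem.Dict.counter ps := by
    rw [PySem.List.foldl_ite_eq_foldl_filter
      (p := fun tr : List (Int × Int) => (t : Int) < (tr.length : Int))
      (f := fun (d : PySem.Dict (Int × Int) Int) tr =>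
        d.insert (PySem.List.pyGetD tr (t : Int) ((0 : Int), (0 : Int)))
          (d.getD (PySem.List.pyGetD tr (t : Int) ((0 : Int), (0 : Int))) 0 + 1))]
    rw [← List.foldl_map
      (g := fun (d : PySem.Dict (Int × Int) Int) q => d.insert q (d.getD q 0 + 1))
      (f := fun tr : List (Int × Int) => PySem.List.pyGetD tr (t : Int) ((0 : Int), (0 : Int)))]
    rw [hlist]
    exact PySem.Dict.foldl_insert_getD_add_one_eq_counter ps
  rw [hfold]
  have hvals : (PySem.Dict.counter ps).values =
      (PySem.Set.ofList ps).map (fun k => ((ps.count k : Int))) := by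
    show ((PySem.Dict.counter ps).items.map (·.2)) = _
    rw [PySem.Dict.items_counter]
    rw [List.map_map]
    rfl
  rw [hvals, List.countP_map, pvDup]
  apply List.countP_congr
  intro a _
  simp only [Function.comp_apply]
  simp

-- fuel bound: a robot's trajectory is no longer than pvFuelA
def pvCost (points : List (List Int)) : List Int → (Int × Int) → Nat
  | [], _ => 0
  | w :: ws, p =>
    ((pvPointB points w).1 - p.1).natAbs + ((pvPointB points w).2 - p.2).natAbs + 1 +
      pvCost points ws (pvPointB points w)

lemma pvFuel_fold (points : List (List Int)) : ∀ (ws : List Int) (p : Int × Int) (n : Nat),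
    (ws.foldl (fun (acc : (Int × Int) × Nat) w =>
      let q := pvPointA points w
      let d : Int × Int := (PySem.List.pyGetD q 0 0, PySem.List.pyGetD q 1 0)
      (d, acc.2 + ((d.1 - acc.1.1).natAbs + (d.2 - acc.1.2).natAbs + 1))) (p, n)).2
    = n + pvCost points ws p := by
  intro ws
  induction ws with
  | nil => intro p n; simp [pvCost]
  | cons w ws ih =>
    intro p n
    simp only [List.foldl_cons]
    have hpb : (PySem.List.pyGetD (pvPointA points w) 0 0,
        PySem.List.pyGetD (pvPointA points w) 1 0) = pvPointB points w := rfl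
    have h1 : PySem.List.pyGetD (pvPointA points w) 0 0 = (pvPointB points w).1 := rfl
    have h2 : PySem.List.pyGetD (pvPointA points w) 1 0 = (pvPointB points w).2 := rfl
    rw [hpb, ih, pvCost, h1, h2]
    omega

lemma pvTrajFrom_length_le (points : List (List Int)) :
    ∀ (ws : List Int) (p : Int × Int),
      (pvTrajFrom (ws.map (pvPointB points)) p).length ≤ pvCost points ws p := by
  intro ws
  induction ws with
  | nil => intro p; simp [pvTrajFrom, pvCost]
  | cons w ws ih =>
    intro p
    rw [List.map_cons, pvTrajFrom, pvCost]
    split_ifs with hpd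
    · have h := ih p
      simp only [List.length_cons]
      rw [hpd] at h ⊢
      omega
    · rw [List.length_append, pvSeg_length]
      have h := ih (pvPointB points w)
      omega

lemma pvTraj_length_le (points : List (List Int)) (l : Int) (route : List Int) :
    (pvTraj points l route).length ≤ pvFuelA points l route := by
  rw [pvTraj, pvFuelA]
  simp only
  rw [pvFuel_fold]
  have hpb : (PySem.List.pyGetD (pvPointA points (PySem.List.pyGetD route 0 0)) 0 0,
      PySem.List.pyGetD (pvPointA points (PySem.List.pyGetD route 0 0)) 1 0) =
      pvStart points route := rfl
  rw [hpb]
  have h := pvTrajFrom_length_le points (PySem.List.slice route (some 1) (some l))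
    (pvStart points route)
  rw [pvDests]
  simp only [List.length_cons]
  omega

lemma pvSims_init (points : List (List Int)) (l : Int) :
    ∀ (rts : List (List Int)), pvSims points l rts
      (rts.map (fun _ => ((0 : Int), ((0 : Int), (0 : Int)), false)))
      (rts.map (pvTraj points l)) := by
  intro rts
  induction rts with
  | nil => simp [pvSims]
  | cons r rs ih =>
    simp only [List.map_cons]
    exact ⟨Or.inl ⟨rfl, rfl⟩, ih⟩

-- ===== VERDICT (by name: the statement is the Claim_ definition above) =====
theorem solution_spec : Claim_equal_solution := by
  unfold Claim_equal_solution
  intro points routes _ hpre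
  obtain ⟨hne, hl, hg0⟩ := hpre
  unfold Spec_solution
  set l : Int := ((routes.headD []).length : Int) with hldef
  have hg : ∀ r ∈ routes, pvGoodRoute points l r := by
    intro r hr
    obtain ⟨h1, h2⟩ := hg0 r hr
    refine ⟨h1, ?_⟩
    have : l.toNat = (routes.headD []).length := by omega
    rw [this]
    exact h2
  -- A's state machine computes pvGold of the trajectories
  have hA : solution points routes = 0 + pvGold (routes.map (pvTraj points l)) := by
    rw [solution]
    simp only [← hldef]
    apply pvLoopA_eq hl hg
    · exact pvSims_init points l routes
    · have hsum : ((routes.map (pvTraj points l)).map List.length).sum ≤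
          (routes.map (pvFuelA points l)).sum := by
        rw [List.map_map]
        apply List.sum_le_sum
        intro r _
        exact pvTraj_length_le points l r
      split_ifs <;> omega
  rw [hA]
  -- B computes the same aggregate
  simp only [solution_alt]
  have htrajs : routes.map (pvTrajB points l) = routes.map (pvTraj points l) :=
    List.map_congr_left (fun r _ => pvTrajB_eq points l r)
  rw [htrajs]
  have htne : (routes.map (pvTraj points l)).map (fun tr => (tr.length : Int)) ≠ [] := by
    simp only [ne_eq, List.map_eq_nil_iff]
    exact hne
  obtain ⟨m, hm⟩ : ∃ m, PySem.List.max?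
      ((routes.map (pvTraj points l)).map (fun tr => (tr.length : Int))) (fun v => v) =
      some m := by
    cases hmx : PySem.List.max?
        ((routes.map (pvTraj points l)).map (fun tr => (tr.length : Int))) (fun v => v) with
    | none => exact absurd ((PySem.List.max?_eq_none_iff _ _).1 hmx) htne
    | some m => exact ⟨m, rfl⟩
  rw [hm]
  simp only [Option.getD_some]
  have hbnd : ∀ r ∈ routes.map (pvTraj points l), r.length ≤ m.toNat := by
    intro r hr
    have := PySem.List.max?_isMax hm (r.length : Int) (List.mem_map_of_mem hr)
    simp only at this
    omega
  rw [pvGold_eq_sum m.toNat (routes.map (pvTraj points l)) hbnd]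
  rw [PySem.List.foldl_add]
  rw [PySem.List.pyRange_zero]
  rw [List.map_map]
  simp only [zero_add]
  apply congrArg List.sum
  apply List.map_congr_left
  intro t _
  simp only [Function.comp_apply]
  exact congrArg Nat.cast (pvCnt_eq (routes.map (pvTraj points l)) t).symm
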